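-- pv_equiv track=rewrite | github.com/Sungmin-Joo/Algorithm-competition | Programmers/동적계획법/타일장식물.py | solution
-- ===== SOURCE A (Python) =====
-- def solution(N):
--     dp = [[4,1], [6,1]]
--     if N < 3:
--         return dp[N-1][0]
--     for i in range(2,N):
--         w = dp[i-1][1] + dp[i-2][1]
--         dp.append([dp[i-1][0] + (w << 1),w])
--
--     return dp[N-1][0]
-- ===== SOURCE B (Python) =====
-- def solution(N):
--     # perimeter = 2 * Fib(N+2), computed by fast doubling: O(log N)
--     def fib_pair(n):
--         # returns (Fib(n), Fib(n+1))
--         if n <= 0: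
--             return (0, 1)
--         a, b = fib_pair(n >> 1)
--         c = a * (2 * b - a)
--         d = a * a + b * b
--         if n & 1:
--             return (d, c + d)
--         return (c, d)
--     return 2 * fib_pair(N + 2)[0]
-- ===== Notes on version B (the rewrite author's own statement) =====
-- stated objective: faster
-- what changed: Replaced the O(N) dp-table loop by the closed form perimeter = 2*Fib(N+2) computed with fast-doubling Fibonacci recursion.
-- outside the precondition, e.g. on solution(0): A returns 6, B returns 2; on solution(-1): A returns 4, B returns 2
import Mathlib
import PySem

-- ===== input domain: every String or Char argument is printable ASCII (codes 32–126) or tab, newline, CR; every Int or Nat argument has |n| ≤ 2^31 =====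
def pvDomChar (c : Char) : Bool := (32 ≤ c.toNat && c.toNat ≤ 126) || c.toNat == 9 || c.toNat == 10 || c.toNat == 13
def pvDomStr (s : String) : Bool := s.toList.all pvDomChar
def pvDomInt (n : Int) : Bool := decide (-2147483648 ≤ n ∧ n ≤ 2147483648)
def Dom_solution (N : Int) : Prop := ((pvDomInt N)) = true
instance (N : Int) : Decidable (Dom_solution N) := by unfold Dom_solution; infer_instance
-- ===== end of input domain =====

-- B replaces A's linear dp loop by the closed form 2*Fib(N+2) computed via fast-doubling Fibonacci (objective: faster).

-- ===== PORT A =====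
-- one iteration of A's 'for i in range(2,N)' loop body over the growing dp table
def solStep (dp : List (Int × Int)) (i : Int) : List (Int × Int) :=
  let w := (PySem.List.pyGetD dp (i - 1) (0, 0)).2 + (PySem.List.pyGetD dp (i - 2) (0, 0)).2
  dp ++ [((PySem.List.pyGetD dp (i - 1) (0, 0)).1 + w * 2, w)]  -- (w << 1) = w * 2 exactly on int

def solution (N : Int) : Int :=
  let dp0 : List (Int × Int) := [(4, 1), (6, 1)]
  if N < 3 then (PySem.List.pyGetD dp0 (N - 1) (0, 0)).1
  else
    let dp := (PySem.List.pyRange 2 N 1).foldl solStep dp0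
    (PySem.List.pyGetD dp (N - 1) (0, 0)).1

-- ===== PORT B =====
-- fast doubling: fibPair n = (Fib n, Fib (n+1))
def fibPair (n : Nat) : Int × Int :=
  if h : n = 0 then (0, 1)
  else
    let p := fibPair (n / 2)
    let c := p.1 * (2 * p.2 - p.1)
    let d := p.1 * p.1 + p.2 * p.2
    if n % 2 = 1 then (d, c + d) else (c, d)
decreasing_by exact Nat.div_lt_self (Nat.pos_of_ne_zero h) one_lt_two

def solution_alt (N : Int) : Int := 2 * (fibPair (N + 2).toNat).1

-- ===== PRECONDITION & SPEC =====
-- Pre_ excludes N ≤ 0, outside the problem's natural domain of N ≥ 1 tiles: for N ≤ -2 A raises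
-- IndexError, and for N ∈ {0, -1} A's returned value is only a negative-index wraparound into the
-- two-entry seed table — a defensible-corner artefact nobody would specify either way.
def Pre_solution (N : Int) : Prop := 1 ≤ N
instance (N : Int) : Decidable (Pre_solution N) := by unfold Pre_solution; infer_instance
def pvWitness_solution : Int := 5

def Spec_solution (N : Int) (out : Int) : Prop := out = solution_alt N
instance (N : Int) (out : Int) : Decidable (Spec_solution N out) := by unfold Spec_solution; infer_instance

-- ===== CLAIM (what is proved, stated in full; the proofs are below) =====
def Claim_equal_solution : Prop := ∀ (N : Int), Dom_solution N → Pre_solution N → Spec_solution N (solution N)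

-- ===== LEMMAS AND PROOFS =====

theorem fib_cast_two_mul (k : Nat) :
    ((Nat.fib (2 * k) : Int)) = (Nat.fib k : Int) * (2 * Nat.fib (k + 1) - Nat.fib k) := by
  have hle : Nat.fib k ≤ 2 * Nat.fib (k + 1) := le_trans Nat.fib_le_fib_succ (by omega)
  rw [Nat.fib_two_mul, Nat.cast_mul, Nat.cast_sub hle]
  push_cast
  ring

theorem fib_cast_two_mul_add_one (k : Nat) :
    ((Nat.fib (2 * k + 1) : Int)) =
      (Nat.fib k : Int) * Nat.fib k + (Nat.fib (k + 1) : Int) * Nat.fib (k + 1) := by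
  rw [Nat.fib_two_mul_add_one]
  push_cast
  ring

-- fast doubling computes consecutive Fibonacci numbers
theorem fibPair_eq (n : Nat) : fibPair n = ((Nat.fib n : Int), (Nat.fib (n + 1) : Int)) := by
  induction n using Nat.strong_induction_on with
  | _ n ih =>
    rw [fibPair]
    by_cases h : n = 0
    · simp [h]
    · have hlt : n / 2 < n := Nat.div_lt_self (Nat.pos_of_ne_zero h) one_lt_two
      rw [dif_neg h, ih (n / 2) hlt]
      simp only
      rcases Nat.even_or_odd n with he | ho
      · obtain ⟨k, hk⟩ := he
        have hn2 : n / 2 = k := by omega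
        have hmod : ¬ (n % 2 = 1) := by omega
        rw [if_neg hmod, hn2, show n = 2 * k by omega,
          show 2 * k + 1 = 2 * k + 1 from rfl, fib_cast_two_mul, fib_cast_two_mul_add_one]
      · obtain ⟨k, hk⟩ := ho
        have hn2 : n / 2 = k := by omega
        have hmod : n % 2 = 1 := by omega
        rw [if_pos hmod, hn2, show n = 2 * k + 1 by omega,
          show 2 * k + 1 + 1 = 2 * (k + 1) by ring, fib_cast_two_mul, fib_cast_two_mul_add_one]
        have hf : (Nat.fib (k + 1 + 1) : Int) = Nat.fib k + Nat.fib (k + 1) := by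
          rw [Nat.fib_add_two]; push_cast; ring
        rw [hf]
        exact Prod.ext rfl (by ring)

-- the value A's dp table holds at position i
def valA (i : Nat) : Int × Int :=
  (2 * ((Nat.fib (i + 1) : Int) + Nat.fib (i + 2)), (Nat.fib (i + 1) : Int))

theorem loop_eq (m : Nat) (hm : 2 ≤ m) :
    (PySem.List.pyRange 2 (m : Int) 1).foldl solStep [(4, 1), (6, 1)] =
      (List.range m).map valA := by
  induction m with
  | zero => omega
  | succ m ih =>
    by_cases h2 : 2 ≤ m
    · have hcast : ((m + 1 : Nat) : Int) = (m : Int) + 1 := by push_cast; ring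
      have hc2 : (2 : Int) ≤ (m : Int) := by exact_mod_cast h2
      rw [hcast, PySem.List.pyRange_one_succ_right hc2,
        List.foldl_append, ih h2, List.foldl_cons, List.foldl_nil, List.range_succ,
        List.map_append, List.map_cons, List.map_nil]
      unfold solStep
      have l1 : ((m : Int) - 1) = ((m - 1 : Nat) : Int) := by omega
      have l2 : ((m : Int) - 2) = ((m - 2 : Nat) : Int) := by omega
      rw [l1, l2, PySem.List.pyGetD_natCast, PySem.List.pyGetD_natCast,
        PySem.List.getD_map_range valA (m) (m - 1) _ (by omega),
        PySem.List.getD_map_range valA (m) (m - 2) _ (by omega)]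
      have e1 : m - 1 + 1 = m := by omega
      have e2 : m - 1 + 2 = m + 1 := by omega
      have e3 : m - 2 + 1 = m - 1 := by omega
      have hfib : (Nat.fib (m + 1) : Int) = Nat.fib (m - 1) + Nat.fib m := by
        rw [show m + 1 = m - 1 + 2 by omega, Nat.fib_add_two,
          show m - 1 + 1 = m by omega]; push_cast; ring
      have hfib2 : (Nat.fib (m + 2) : Int) = Nat.fib m + Nat.fib (m + 1) := by
        rw [Nat.fib_add_two]; push_cast; ring
      simp only [valA]
      rw [e1, e2, e3, hfib2, hfib]
      congr 1
      refine congrArg (fun x => [x]) ?_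
      refine Prod.ext ?_ ?_ <;> simp only <;> ring
    · have hm1 : m = 1 := by omega
      subst hm1
      decide
  
theorem solution_spec : Claim_equal_solution := by
  intro N _ hPre
  unfold Spec_solution
  by_cases hN : N < 3
  · have : N = 1 ∨ N = 2 := by unfold Pre_solution at hPre; omega
    rcases this with h | h <;> subst h <;>
      · rw [show solution_alt _ = 2 * (fibPair _).1 from rfl, fibPair_eq]
        decide
  · have hpos : 0 ≤ N := by omega
    obtain ⟨n, hn⟩ : ∃ n : Nat, N = (n : Int) := ⟨N.toNat, (Int.toNat_of_nonneg hpos).symm⟩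
    subst hn
    have hn3 : 3 ≤ n := by omega
    unfold solution solution_alt
    rw [if_neg hN, loop_eq n (by omega)]
    show (PySem.List.pyGetD (List.map valA (List.range n)) ((n : Int) - 1) (0, 0)).1 =
      2 * (fibPair ((n : Int) + 2).toNat).1
    have l1 : ((n : Int) - 1) = ((n - 1 : Nat) : Int) := by omega
    rw [l1, PySem.List.pyGetD_natCast,
      PySem.List.getD_map_range valA n (n - 1) _ (by omega)]
    have ht : ((n : Int) + 2).toNat = n + 2 := by omega
    rw [ht, fibPair_eq]
    have e1 : n - 1 + 1 = n := by omega
    have e2 : n - 1 + 2 = n + 1 := by omega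
    have hfib : (Nat.fib (n + 2) : Int) = Nat.fib n + Nat.fib (n + 1) := by
      rw [Nat.fib_add_two]; push_cast; ring
    simp only [valA, e1, e2]
    rw [hfib]
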